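-- pv_equiv track=rewrite | github.com/sylvzzz/42_Piscine_Python | PyM3/ex3/ft_achievement_tracker.py | get_common_achievements
-- ===== SOURCE A (Python) =====
-- def get_common_achievements(players: dict) -> set:
--     if not players:
--         return set()
--
--     player_list = list(players.values())
--     common = player_list[0]
--
--     for achievements in player_list[1:]:
--         common = common.intersection(achievements)
--
--     return common
-- ===== SOURCE B (Python) =====
-- def get_common_achievements(players: dict) -> set:
--     if not players:
--         return set()
--     counts = {}
--     for achievements in players.values():
--         for a in achievements:
--             counts[a] = counts.get(a, 0) + 1
--     n = len(players)
--     return {a for a in counts if counts[a] == n}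
-- ===== Notes on version B (the rewrite author's own statement) =====
-- stated objective: alternative
-- what changed: Replaces the fold of pairwise set intersections with a single counting pass (a frequency dict over all players' achievements) followed by a threshold filter keeping achievements whose count equals the number of players.
import Mathlib
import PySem

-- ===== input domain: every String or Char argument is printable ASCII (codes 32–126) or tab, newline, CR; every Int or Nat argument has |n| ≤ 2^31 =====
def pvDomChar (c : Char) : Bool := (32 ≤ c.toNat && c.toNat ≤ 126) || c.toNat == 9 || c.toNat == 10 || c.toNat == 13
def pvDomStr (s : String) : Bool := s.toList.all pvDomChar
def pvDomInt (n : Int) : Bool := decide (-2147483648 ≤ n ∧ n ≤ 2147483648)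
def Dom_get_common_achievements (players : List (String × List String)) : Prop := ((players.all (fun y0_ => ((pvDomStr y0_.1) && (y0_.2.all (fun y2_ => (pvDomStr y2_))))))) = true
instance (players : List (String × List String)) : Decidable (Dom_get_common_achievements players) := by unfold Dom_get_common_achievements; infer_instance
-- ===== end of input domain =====

-- B replaces A's fold of pairwise set intersections by one counting pass plus a threshold filter (alternative decomposition, same cost).


-- ===== PORT A =====
-- values of the dict are Python sets (dict[str, set[str]]): modelled as PySem.Set.ofList of the value list
def get_common_achievements (players : List (String × List String)) : List String :=
  match players with
  | [] => []
  | (_, v0) :: rest =>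
      rest.foldl (fun common kv => PySem.Set.inter common kv.2) (PySem.Set.ofList v0)

-- ===== PORT B =====
def get_common_achievements_alt (players : List (String × List String)) : List String :=
  match players with
  | [] => []
  | _ :: _ =>
      let counts : PySem.Dict String Int :=
        players.foldl
          (fun d kv => (PySem.Set.ofList kv.2).foldl (fun d a => d.modify a 0 (· + 1)) d)
          PySem.Dict.empty
      let n : Int := (players.length : Int)
      counts.keys.filter (fun a => counts.getD a 0 == n)

-- ===== PRECONDITION & SPEC =====
def Spec_get_common_achievements (players : List (String × List String)) (out : List String) : Prop := out = get_common_achievements_alt players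
instance (players : List (String × List String)) (out : List String) : Decidable (Spec_get_common_achievements players out) := by unfold Spec_get_common_achievements; infer_instance

-- ===== CLAIM (what is proved, stated in full; the proofs are below) =====
def Claim_equal_get_common_achievements : Prop := ∀ (players : List (String × List String)), Dom_get_common_achievements players → Spec_get_common_achievements players (get_common_achievements players)

-- ===== LEMMAS AND PROOFS =====

-- the flat multiset of achievements (each player's set counted once)
def pvFlat (players : List (String × List String)) : List String :=
  players.flatMap (fun kv => PySem.Set.ofList kv.2)

theorem pv_foldl_flat {β : Type} (g : β → String → β) :
    ∀ (l : List (String × List String)) (d : β),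
      l.foldl (fun d kv => (PySem.Set.ofList kv.2).foldl g d) d = (pvFlat l).foldl g d := by
  intro l
  induction l with
  | nil => intro d; rfl
  | cons kv rest ih =>
      intro d
      simp [pvFlat, List.foldl_append, ih]

theorem pv_count_flat (players : List (String × List String)) (a : String) :
    (pvFlat players).count a = (players.filter (fun kv => decide (a ∈ kv.2))).length := by
  induction players with
  | nil => rfl
  | cons kv rest ih =>
      have hf : pvFlat (kv :: rest) = PySem.Set.ofList kv.2 ++ pvFlat rest := rfl
      rw [hf, List.count_append, ih, List.filter_cons]
      by_cases h : a ∈ kv.2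
      · rw [List.count_eq_one_of_mem (PySem.Set.nodup_ofList _) ((PySem.Set.mem_ofList _ _).mpr h)]
        simp [h]
        omega
      · rw [List.count_eq_zero_of_not_mem (fun hm => h ((PySem.Set.mem_ofList _ _).mp hm))]
        simp [h]

theorem pv_foldl_inter :
    ∀ (l : List (String × List String)) (s : List String),
      l.foldl (fun common kv => PySem.Set.inter common kv.2) s
        = s.filter (fun x => l.all (fun kv => kv.2.contains x)) := by
  intro l
  induction l with
  | nil => intro s; simp
  | cons kv rest ih =>
      intro s
      rw [List.foldl_cons, ih]
      simp only [PySem.Set.inter, List.filter_filter, List.all_cons]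
      apply List.filter_congr
      intro x _
      simp [Bool.and_comm]

theorem pv_beq_cast (A B : Nat) : ((A : Int) == (B : Int)) = decide (A = B) := by
  by_cases h : A = B
  · subst h; simp
  · simp [h]

theorem pv_main (k0 : String) (v0 : List String) (rest : List (String × List String)) :
    get_common_achievements ((k0, v0) :: rest) = get_common_achievements_alt ((k0, v0) :: rest) := by
  have hc : (((k0, v0) :: rest).foldl
      (fun d kv => (PySem.Set.ofList kv.2).foldl (fun d a => d.modify a 0 (· + 1)) d)
      PySem.Dict.empty) = PySem.Dict.counter (pvFlat ((k0, v0) :: rest)) := by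
    rw [pv_foldl_flat]; rfl
  have hF : pvFlat ((k0, v0) :: rest) = PySem.Set.ofList v0 ++ pvFlat rest := rfl
  simp only [get_common_achievements, get_common_achievements_alt, hc]
  rw [pv_foldl_inter, PySem.Dict.keys_counter]
  have hq : ∀ a : String,
      (PySem.Dict.getD (PySem.Dict.counter (pvFlat ((k0, v0) :: rest))) a 0
        == ((((k0, v0) :: rest).length : Nat) : Int))
      = decide ((List.filter (fun kv => decide (a ∈ kv.2)) ((k0, v0) :: rest)).length
          = rest.length + 1) := by
    intro a
    rw [PySem.Dict.getD_counter, pv_count_flat, pv_beq_cast]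
    simp only [List.length_cons]
    try rfl
  have hkeys : PySem.Set.ofList (pvFlat ((k0, v0) :: rest))
      = PySem.Set.ofList v0
        ++ List.filter (fun y => !(PySem.Set.ofList v0).contains y)
            (PySem.Set.ofList (pvFlat rest)) := by
    rw [hF, PySem.Set.ofList_append, PySem.Set.ofList_ofList, PySem.Set.update_eq_append_filter]
  rw [hkeys, List.filter_append]
  have h2 : (List.filter
      (fun a => PySem.Dict.getD (PySem.Dict.counter (pvFlat ((k0, v0) :: rest))) a 0
        == ((((k0, v0) :: rest).length : Nat) : Int))
      (List.filter (fun y => !(PySem.Set.ofList v0).contains y)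
        (PySem.Set.ofList (pvFlat rest)))) = [] := by
    rw [List.filter_eq_nil_iff]
    intro y hy
    have hy' : y ∉ v0 := by
      have hny := (List.mem_filter.mp hy).2
      simp only [Bool.not_eq_eq_eq_not, Bool.not_true, PySem.Set.contains_eq_listContains] at hny
      intro hmem
      rw [List.contains_eq_mem, decide_eq_false_iff_not] at hny
      exact hny ((PySem.Set.mem_ofList _ _).mpr hmem)
    rw [hq y]
    simp only [decide_eq_true_eq]
    intro hlen
    have hfc : List.filter (fun kv => decide (y ∈ kv.2)) ((k0, v0) :: rest)
        = List.filter (fun kv => decide (y ∈ kv.2)) rest := by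
      rw [List.filter_cons]
      simp [hy']
    rw [hfc] at hlen
    have := List.length_filter_le (fun kv => decide (y ∈ kv.2)) rest
    omega
  rw [h2, List.append_nil]
  apply List.filter_congr
  intro x hx
  have hx' : x ∈ v0 := (PySem.Set.mem_ofList _ _).mp hx
  rw [hq x]
  have hfc : List.filter (fun kv => decide (x ∈ kv.2)) ((k0, v0) :: rest)
      = (k0, v0) :: List.filter (fun kv => decide (x ∈ kv.2)) rest := by
    rw [List.filter_cons]
    simp [hx']
  rw [hfc]
  simp only [List.length_cons, Nat.add_right_cancel_iff]
  rw [Bool.eq_iff_iff]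
  simp [List.all_eq_true, List.length_filter_eq_length_iff]

-- ===== VERDICT (by name: the statement is the Claim_ definition above) =====
theorem get_common_achievements_spec : Claim_equal_get_common_achievements := by
  intro players _
  unfold Spec_get_common_achievements
  match players with
  | [] => rfl
  | (k0, v0) :: rest => exact pv_main k0 v0 rest
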